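-- pv_equiv track=rewrite | github.com/arushi-08/coding | my-folder/2586-longest-square-streak-in-an-array/solution.py | longestSquareStreak
-- ===== SOURCE A (Python) =====
-- from typing import List
--
-- def longestSquareStreak(nums: List[int]) -> int:
--
--     # check how many numbers after current number
--     #   form squares of previous numbers
--
--     # [4,3,6,16,8,2]
--     # [4,16,2]
--
--     # check which numbers are squares of one another
--     # add them to a set/list
--     nums_set = set(nums)
--     max_len = -1
--
--     for num in nums:
--         candidate_set = set()
--         n = num**2
--         while n in nums_set:
--             candidate_set.add(num)
--             candidate_set.add(n)
--             n = n**2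
--         if candidate_set:
--             max_len = max(max_len, len(candidate_set))
--
--     return max_len
-- ===== SOURCE B (Python) =====
-- def longestSquareStreak(nums):
--     # DP over the distinct values sorted descending: dp[v] = length of the
--     # square streak starting at v (v*v was processed before v).
--     dp = {}
--     for v in sorted(set(nums), reverse=True):
--         sq = v * v
--         dp[v] = dp[sq] + 1 if sq in dp else 1
--     best = max(dp.values(), default=0)
--     return best if best >= 2 else -1
-- ===== Notes on version B (the rewrite author's own statement) =====
-- stated objective: alternative
-- what changed: Replaces A's per-element while-loop chain walk (re-walking every chain from every start) by a single dynamic-programming pass over the distinct values sorted descending, so each value's streak length is computed once from dp[v*v]; Pre_ excludes inputs containing 0 or 1, on which A's while loop never terminates (n**2 stays in the set forever).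
import Mathlib
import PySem

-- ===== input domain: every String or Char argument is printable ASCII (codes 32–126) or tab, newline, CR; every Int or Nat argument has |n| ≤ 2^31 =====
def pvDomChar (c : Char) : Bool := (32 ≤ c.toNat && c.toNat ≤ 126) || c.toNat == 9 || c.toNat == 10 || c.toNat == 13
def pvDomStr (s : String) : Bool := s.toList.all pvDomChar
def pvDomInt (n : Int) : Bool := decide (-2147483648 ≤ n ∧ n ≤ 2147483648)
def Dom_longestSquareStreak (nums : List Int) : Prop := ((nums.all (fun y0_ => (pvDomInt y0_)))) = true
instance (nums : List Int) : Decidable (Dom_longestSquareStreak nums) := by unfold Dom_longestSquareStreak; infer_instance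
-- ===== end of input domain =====

-- B replaces A's per-start while-loop chain walks by one DP pass over the distinct
-- values sorted descending (dp[v] = dp[v*v] + 1); equivalence of the return values.

-- ===== PORT A =====
-- A's `while n in nums_set` loop, with fuel: on Pre_ the visited n are strictly
-- increasing members of nums_set, so fuel nums.length + 1 is never exhausted
-- (exact there; outside Pre_ the Python loop diverges).
def pvALoop (s : PySem.Set Int) (num : Int) : Nat → Int → PySem.Set Int → PySem.Set Int
  | 0, _, cand => cand
  | f + 1, n, cand =>
    if PySem.Set.contains s n then
      pvALoop s num f (n ^ 2) (PySem.Set.add (PySem.Set.add cand num) n)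
    else cand

def longestSquareStreak (nums : List Int) : Int :=
  let numsSet : PySem.Set Int := PySem.Set.ofList nums
  nums.foldl (fun maxLen num =>
    let cand := pvALoop numsSet num (nums.length + 1) (num ^ 2) PySem.Set.empty
    if cand = [] then maxLen else max maxLen (cand.length : Int)) (-1)

-- ===== PORT B =====
def longestSquareStreak_alt (nums : List Int) : Int :=
  let vals := PySem.List.sorted (PySem.Set.ofList nums) (fun x => x) true
  let dp := vals.foldl (fun (dp : PySem.Dict Int Int) v =>
    dp.insert v (match dp.get? (v * v) with
                 | some d => d + 1
                 | none => 1)) PySem.Dict.empty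
  let best := (PySem.List.max? dp.values (fun x => x)).getD 0
  if best ≥ 2 then best else -1

-- ===== PRECONDITION & SPEC =====
-- Pre_ excludes inputs containing 0 or 1: there A's `while n in nums_set` loop
-- never terminates (0**2 = 0, 1**2 = 1), so A returns on exactly the inputs of Pre_.
def Pre_longestSquareStreak (nums : List Int) : Prop :=
  (0 : Int) ∉ nums ∧ (1 : Int) ∉ nums
instance (nums : List Int) : Decidable (Pre_longestSquareStreak nums) := by
  unfold Pre_longestSquareStreak; infer_instance

def pvWitness_longestSquareStreak : List Int := [4, 3, 6, 16, 8, 2]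

def Spec_longestSquareStreak (nums : List Int) (out : Int) : Prop := out = longestSquareStreak_alt nums
instance (nums : List Int) (out : Int) : Decidable (Spec_longestSquareStreak nums out) := by unfold Spec_longestSquareStreak; infer_instance

-- ===== CLAIM (what is proved, stated in full; the proofs are below) =====
def Claim_equal_longestSquareStreak : Prop := ∀ (nums : List Int), Dom_longestSquareStreak nums → Pre_longestSquareStreak nums → Spec_longestSquareStreak nums (longestSquareStreak nums)

-- ===== LEMMAS AND PROOFS =====

-- number of iterations of A's while loop started at n (same fuel discipline as the ports)
def pvIter (s : List Int) (n : Int) : Nat → Int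
  | 0 => 0
  | f + 1 => if n ∈ s then 1 + pvIter s (n * n) f else 0

theorem pvIter_nonneg (s : List Int) : ∀ f n, 0 ≤ pvIter s n f := by
  intro f
  induction f with
  | zero => intro n; simp [pvIter]
  | succ f ih =>
    intro n
    simp only [pvIter]
    split
    · have := ih (n * n); omega
    · omega

theorem pv_lt_sq {x : Int} (h0 : x ≠ 0) (h1 : x ≠ 1) : x < x * x := by
  rcases lt_trichotomy x 0 with h | h | h
  · nlinarith
  · omega
  · have : 2 ≤ x := by omega
    nlinarith

theorem pv_sq_mem_lt {s : List Int} (hs : ∀ x ∈ s, x ≠ 0 ∧ x ≠ 1) {v : Int}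
    (h : v * v ∈ s) : v < v * v := by
  have h2 := hs _ h
  rcases lt_trichotomy v 0 with h' | h' | h'
  · nlinarith
  · simp [h'] at h2
  · rcases (by omega : v = 1 ∨ 2 ≤ v) with h'' | h''
    · subst h''; simp at h2
    · nlinarith

theorem pv_filter_length_le {α : Type} (p q : α → Bool) :
    ∀ s : List α, (∀ x ∈ s, p x = true → q x = true) →
      (s.filter p).length ≤ (s.filter q).length := by
  intro s
  induction s with
  | nil => simp
  | cons a t ih =>
    intro h
    have ht := ih (fun x hx => h x (List.mem_cons_of_mem _ hx))
    by_cases hp : p a = true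
    · have hq := h a (List.mem_cons_self) hp
      simp [List.filter, hp, hq]; omega
    · simp only [List.filter]
      rw [Bool.not_eq_true] at hp
      rw [hp]
      cases hq : q a <;> simp <;> omega

theorem pv_filter_length_lt {α : Type} (p q : α → Bool) (n : α) :
    ∀ s : List α, n ∈ s → (∀ x ∈ s, p x = true → q x = true) →
      p n = false → q n = true → (s.filter p).length < (s.filter q).length := by
  intro s
  induction s with
  | nil => simp
  | cons a t ih =>
    intro hn h hp hq
    rcases List.mem_cons.mp hn with rfl | hn
    · have hle := pv_filter_length_le p q t (fun x hx => h x (List.mem_cons_of_mem _ hx))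
      simp [List.filter, hp, hq]; omega
    · have hlt := ih hn (fun x hx => h x (List.mem_cons_of_mem _ hx)) hp hq
      by_cases hpa : p a = true
      · have hqa := h a (List.mem_cons_self) hpa
        simp [List.filter, hpa, hqa]; omega
      · simp only [List.filter]
        rw [Bool.not_eq_true] at hpa
        rw [hpa]
        cases hqa : q a <;> simp <;> omega

-- fuel stability: once the fuel exceeds the number of set members ≥ n, pvIter is stable
theorem pvIter_succ (s : List Int) (hs : ∀ x ∈ s, x ≠ 0 ∧ x ≠ 1) :
    ∀ f n, (s.filter (fun x => decide (n ≤ x))).length ≤ f →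
      pvIter s n (f + 1) = pvIter s n f := by
  intro f
  induction f with
  | zero =>
    intro n hb
    have hn : n ∉ s := by
      intro hmem
      have : n ∈ s.filter (fun x => decide (n ≤ x)) := by
        simp [List.mem_filter, hmem]
      have := List.length_pos_of_mem this
      omega
    simp [pvIter, hn]
  | succ f ih =>
    intro n hb
    by_cases hn : n ∈ s
    · have hlt : n < n * n := by
        have := hs n hn; exact pv_lt_sq this.1 this.2
      have hstep : (s.filter (fun x => decide (n * n ≤ x))).length
          < (s.filter (fun x => decide (n ≤ x))).length := by
        apply pv_filter_length_lt _ _ n s hn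
        · intro x _ hx
          simp only [decide_eq_true_eq] at hx ⊢
          omega
        · simp; omega
        · simp
      have h2 := ih (n * n) (by omega)
      have e1 : pvIter s n (f + 1 + 1) = 1 + pvIter s (n * n) (f + 1) := by
        rw [pvIter, if_pos hn]
      have e2 : pvIter s n (f + 1) = 1 + pvIter s (n * n) f := by
        rw [pvIter, if_pos hn]
      rw [e1, e2, h2]
    · simp [pvIter, hn]

theorem pvIter_stable (s : List Int) (hs : ∀ x ∈ s, x ≠ 0 ∧ x ≠ 1)
    (f g : Nat) (n : Int) (hb : (s.filter (fun x => decide (n ≤ x))).length ≤ f)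
    (hfg : f ≤ g) : pvIter s n f = pvIter s n g := by
  induction g, hfg using Nat.le_induction with
  | base => rfl
  | succ g hg ih => rw [ih, pvIter_succ s hs g n (by omega)]

-- ----- A-side characterisation -----

theorem pvALoop_length (s : PySem.Set Int) (hs : ∀ x ∈ s, x ≠ 0 ∧ x ≠ 1) (num : Int) :
    ∀ (f : Nat) (n : Int) (cand : PySem.Set Int), num ∈ cand → (∀ x ∈ cand, x < n) →
      ((pvALoop s num f n cand).length : Int) = (cand.length : Int) + pvIter s n f := by
  intro f
  induction f with
  | zero => intro n cand _ _; simp [pvALoop, pvIter]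
  | succ f ih =>
    intro n cand hnum hlt
    by_cases hn : n ∈ s
    · have hc : PySem.Set.contains s n = true := (PySem.Set.contains_iff s n).mpr hn
      rw [pvALoop, if_pos hc]
      have hnc : n ∉ cand := fun hmem => absurd (hlt n hmem) (lt_irrefl n)
      have hadd : PySem.Set.add (PySem.Set.add cand num) n = cand ++ [n] := by
        rw [PySem.Set.add_of_mem hnum, PySem.Set.add_of_not_mem hnc]
      have hnn : n < n * n := pv_lt_sq (hs n hn).1 (hs n hn).2
      have hlt' : ∀ x ∈ cand ++ [n], x < n ^ 2 := by
        intro x hx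
        rw [pow_two]
        rcases List.mem_append.mp hx with hx | hx
        · exact lt_trans (hlt x hx) hnn
        · rw [List.mem_singleton.mp hx]; exact hnn
      rw [hadd, ih (n ^ 2) (cand ++ [n]) (List.mem_append_left _ hnum) hlt']
      have : pvIter s n (f + 1) = 1 + pvIter s (n * n) f := by
        rw [pvIter, if_pos hn]
      rw [this, pow_two]
      simp
      omega
    · rw [pvALoop, if_neg (fun h => hn ((PySem.Set.contains_iff s n).mp h)),
        pvIter, if_neg hn]
      omega

-- if num² ∈ s the candidate set has 1 + pvIter s num² elements; else it is empty
theorem pvA_cand (s : PySem.Set Int) (hs : ∀ x ∈ s, x ≠ 0 ∧ x ≠ 1) (num : Int) (F : Nat) :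
    (if (num * num) ∈ s then
      ((pvALoop s num (F + 1) (num ^ 2) PySem.Set.empty).length : Int) = 1 + pvIter s (num * num) (F + 1)
        ∧ pvALoop s num (F + 1) (num ^ 2) PySem.Set.empty ≠ []
     else pvALoop s num (F + 1) (num ^ 2) PySem.Set.empty = []) := by
  by_cases hmem : (num * num) ∈ s
  · rw [if_pos hmem]
    have hc : PySem.Set.contains s (num ^ 2) = true := by
      rw [PySem.Set.contains_iff s (num ^ 2), pow_two]; exact hmem
    have hlt1 : num < num * num := pv_sq_mem_lt hs hmem
    have hlt2 : num * num < (num * num) * (num * num) :=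
      pv_lt_sq (hs _ hmem).1 (hs _ hmem).2
    have hne : num ^ 2 ∉ ([num] : List Int) := by
      rw [List.mem_singleton, pow_two]
      exact fun hcontra => (ne_of_lt hlt1) hcontra.symm
    have e0 : (PySem.Set.empty : PySem.Set Int).add num = [num] := by
      simp [PySem.Set.add_of_not_mem, PySem.Set.empty]
    have hadd : PySem.Set.add (PySem.Set.add PySem.Set.empty num) (num ^ 2) = [num, num ^ 2] := by
      rw [e0, PySem.Set.add_of_not_mem hne]; rfl
    have hstep : pvALoop s num (F + 1) (num ^ 2) PySem.Set.empty
        = pvALoop s num F ((num ^ 2) ^ 2) [num, num ^ 2] := by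
      rw [pvALoop, if_pos hc, hadd]
    have hlen := pvALoop_length s hs num F ((num ^ 2) ^ 2) [num, num ^ 2]
      (List.mem_cons_self) (by
        intro x hx
        rcases List.mem_cons.mp hx with rfl | hx
        · calc x < x * x := hlt1
            _ < (x * x) * (x * x) := hlt2
            _ = (x ^ 2) ^ 2 := by ring
        · rw [List.mem_singleton.mp hx, pow_two, pow_two]; exact hlt2)
    have hiter : pvIter s (num * num) (F + 1) = 1 + pvIter s ((num * num) * (num * num)) F := by
      rw [pvIter, if_pos hmem]
    constructor
    · rw [hstep, hlen, hiter]
      have : (num ^ 2) ^ 2 = (num * num) * (num * num) := by ring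
      rw [this]
      simp
      omega
    · rw [hstep]
      intro hnil
      have := pvALoop_length s hs num F ((num ^ 2) ^ 2) [num, num ^ 2]
        (List.mem_cons_self) (by
          intro x hx
          rcases List.mem_cons.mp hx with rfl | hx
          · calc x < x * x := hlt1
              _ < (x * x) * (x * x) := hlt2
              _ = (x ^ 2) ^ 2 := by ring
          · rw [List.mem_singleton.mp hx, pow_two, pow_two]; exact hlt2)
      rw [hnil] at this
      have hpos := pvIter_nonneg s F ((num ^ 2) ^ 2)
      simp at this
      omega
  · rw [if_neg hmem]
    have hnc : ¬ PySem.Set.contains s (num ^ 2) = true := by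
      rw [PySem.Set.contains_iff s (num ^ 2), pow_two]; exact hmem
    rw [pvALoop, if_neg hnc]
    rfl

-- ----- generic fold-max facts -----

theorem pvFoldMax_ge {l : List Int} (p : Int → Prop) [DecidablePred p] (f : Int → Int) :
    ∀ (init : Int), (∀ x ∈ l, p x → f x ≤ l.foldl (fun m x => if p x then max m (f x) else m) init)
      ∧ init ≤ l.foldl (fun m x => if p x then max m (f x) else m) init := by
  induction l with
  | nil => intro init; simp
  | cons a t ih =>
    intro init
    constructor
    · intro x hx hpx
      rcases List.mem_cons.mp hx with rfl | hx
      · simp only [List.foldl_cons, if_pos hpx]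
        have := (ih (max init (f x))).2
        omega
      · simp only [List.foldl_cons]
        split
        · exact (ih _).1 x hx hpx
        · exact (ih _).1 x hx hpx
    · simp only [List.foldl_cons]
      split
      · have := (ih (max init (f a))).2; omega
      · exact (ih init).2

theorem pvFoldMax_cases {l : List Int} (p : Int → Prop) [DecidablePred p] (f : Int → Int) :
    ∀ (init : Int), l.foldl (fun m x => if p x then max m (f x) else m) init = init
      ∨ ∃ x ∈ l, p x ∧ l.foldl (fun m x => if p x then max m (f x) else m) init = f x := by
  induction l with
  | nil => intro init; simp
  | cons a t ih =>
    intro init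
    simp only [List.foldl_cons]
    by_cases hpa : p a
    · rw [if_pos hpa]
      rcases ih (max init (f a)) with h | ⟨x, hx, hpx, h⟩
      · rcases max_cases init (f a) with ⟨h', _⟩ | ⟨h', _⟩
        · left; rw [h, h']
        · right; exact ⟨a, List.mem_cons_self, hpa, by rw [h, h']⟩
      · right; exact ⟨x, List.mem_cons_of_mem _ hx, hpx, h⟩
    · rw [if_neg hpa]
      rcases ih init with h | ⟨x, hx, hpx, h⟩
      · left; exact h
      · right; exact ⟨x, List.mem_cons_of_mem _ hx, hpx, h⟩

-- ----- B-side characterisation -----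

theorem pvDpInv (s : List Int) (hs : ∀ x ∈ s, x ≠ 0 ∧ x ≠ 1) (F : Nat) (hF : s.length ≤ F) :
    ∀ (l : List Int) (dp : PySem.Dict Int Int),
      (∀ x ∈ l, x ∈ s) → l.Pairwise (fun a b => b < a) →
      (∀ k ∈ s, (∀ a ∈ l, a < k) ∨ k ∈ l) →
      (∀ k : Int, dp.get? k =
        if k ∈ s ∧ (∀ a ∈ l, a < k) then some (1 + pvIter s (k * k) (F + 1)) else none) →
      ∀ k : Int,
        (l.foldl (fun (dp : PySem.Dict Int Int) v =>
          dp.insert v (match dp.get? (v * v) with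
                       | some d => d + 1
                       | none => 1)) dp).get? k =
        if k ∈ s then some (1 + pvIter s (k * k) (F + 1)) else none := by
  intro l
  induction l with
  | nil =>
    intro dp _ _ _ hdp k
    rw [List.foldl_nil, hdp k]
    simp
  | cons v t ih =>
    intro dp hmem hsorted hcov hdp k
    have hv : v ∈ s := hmem v List.mem_cons_self
    have hvt : ∀ a ∈ t, a < v := (List.pairwise_cons.mp hsorted).1
    -- the inserted value is 1 + pvIter s (v*v) (F+1)
    have hval : (match dp.get? (v * v) with
                 | some d => d + 1
                 | none => 1) = 1 + pvIter s (v * v) (F + 1) := by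
      by_cases hvv : (v * v) ∈ s
      · have hlt : v < v * v := pv_sq_mem_lt hs hvv
        have hcond : (v * v) ∈ s ∧ (∀ a ∈ v :: t, a < v * v) := by
          refine ⟨hvv, ?_⟩
          intro a ha
          rcases List.mem_cons.mp ha with rfl | ha
          · exact hlt
          · exact lt_trans (hvt a ha) hlt
        rw [hdp (v * v), if_pos hcond]
        show (1 + pvIter s ((v * v) * (v * v)) (F + 1)) + 1 = 1 + pvIter s (v * v) (F + 1)
        have hstab : pvIter s ((v * v) * (v * v)) F = pvIter s ((v * v) * (v * v)) (F + 1) := by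
          apply pvIter_stable s hs F (F + 1) _ _ (by omega)
          have hlt2 : v * v < (v * v) * (v * v) := pv_lt_sq (hs _ hvv).1 (hs _ hvv).2
          have := pv_filter_length_lt (fun x => decide ((v * v) * (v * v) ≤ x))
            (fun _ => true) (v * v) s hvv (by simp) (by simp; omega) rfl
          simp only [List.filter_true] at this
          omega
        have hunf : pvIter s (v * v) (F + 1) = 1 + pvIter s ((v * v) * (v * v)) F := by
          rw [pvIter, if_pos hvv]
        rw [hunf, hstab]
        omega
      · have hcond : ¬ ((v * v) ∈ s ∧ (∀ a ∈ v :: t, a < v * v)) := by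
          intro h; exact hvv h.1
        rw [hdp (v * v), if_neg hcond]
        show (1 : Int) = 1 + pvIter s (v * v) (F + 1)
        rw [pvIter, if_neg hvv]
        omega
    rw [List.foldl_cons, hval]
    apply ih (dp.insert v (1 + pvIter s (v * v) (F + 1)))
    · exact fun x hx => hmem x (List.mem_cons_of_mem _ hx)
    · exact (List.pairwise_cons.mp hsorted).2
    · intro j hj
      rcases hcov j hj with hall | hjin
      · exact Or.inl (fun a ha => hall a (List.mem_cons_of_mem _ ha))
      · rcases List.mem_cons.mp hjin with rfl | hjin
        · exact Or.inl hvt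
        · exact Or.inr hjin
    · intro j
      rw [PySem.Dict.get?_insert]
      by_cases hjv : j = v
      · subst hjv
        rw [if_pos rfl, if_pos ⟨hv, hvt⟩]
      · rw [if_neg hjv, hdp j]
        by_cases hjs : j ∈ s
        · by_cases hnew : ∀ a ∈ t, a < j
          · have hvj : v < j := by
              rcases hcov j hjs with hall | hjin
              · exact hall v List.mem_cons_self
              · rcases List.mem_cons.mp hjin with rfl | hjin
                · exact absurd rfl hjv
                · exact absurd (hnew j hjin) (lt_irrefl j)
            have hold : ∀ a ∈ v :: t, a < j := by
              intro a ha
              rcases List.mem_cons.mp ha with rfl | ha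
              · exact hvj
              · exact hnew a ha
            rw [if_pos ⟨hjs, hold⟩, if_pos ⟨hjs, hnew⟩]
          · have hold : ¬ (j ∈ s ∧ ∀ a ∈ v :: t, a < j) := by
              intro h
              exact hnew (fun a ha => h.2 a (List.mem_cons_of_mem _ ha))
            rw [if_neg hold, if_neg (fun h => hnew h.2)]
        · rw [if_neg (fun h => hjs h.1), if_neg (fun h => hjs h.1)]

theorem pvIter_ge_one (s : List Int) (f : Nat) (n : Int) (hn : n ∈ s) :
    1 ≤ pvIter s n (f + 1) := by
  rw [pvIter, if_pos hn]
  have := pvIter_nonneg s f (n * n)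
  omega

theorem pvIter_mem_of_pos (s : List Int) (f : Nat) (n : Int) (h : 1 ≤ pvIter s n f) :
    n ∈ s := by
  by_contra hn
  cases f with
  | zero => simp [pvIter] at h
  | succ f => rw [pvIter, if_neg hn] at h; omega

theorem pvFinal (s : List Int) (nums vals : List Int) (hne : vals ≠ [])
    (hmemv : ∀ x : Int, x ∈ vals ↔ x ∈ s) (hmemn : ∀ x : Int, x ∈ s ↔ x ∈ nums) (F : Nat) :
    nums.foldl (fun m x => if (x * x) ∈ s then max m (1 + pvIter s (x * x) (F + 1)) else m) (-1)
      = (if ((PySem.List.max? (vals.map (fun v => 1 + pvIter s (v * v) (F + 1))) (fun x => x)).getD 0) ≥ 2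
         then ((PySem.List.max? (vals.map (fun v => 1 + pvIter s (v * v) (F + 1))) (fun x => x)).getD 0)
         else -1) := by
  have hVne : vals.map (fun v => 1 + pvIter s (v * v) (F + 1)) ≠ [] := by
    intro hcontra; exact hne (List.map_eq_nil_iff.mp hcontra)
  obtain ⟨b, hb⟩ : ∃ b, PySem.List.max? (vals.map (fun v => 1 + pvIter s (v * v) (F + 1))) (fun x => x) = some b := by
    cases heq : PySem.List.max? (vals.map (fun v => 1 + pvIter s (v * v) (F + 1))) (fun x => x) with
    | none => exact absurd ((PySem.List.max?_eq_none_iff _ _).mp heq) hVne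
    | some b => exact ⟨b, rfl⟩
  rw [hb]
  simp only [Option.getD_some]
  have hbmem := PySem.List.max?_mem hb
  have hbmax := PySem.List.max?_isMax hb
  obtain ⟨w, hw, hwb⟩ := List.mem_map.mp hbmem
  have hge := (pvFoldMax_ge (l := nums) (fun x => (x * x) ∈ s) (fun x => 1 + pvIter s (x * x) (F + 1)) (-1)).1
  have hcases := pvFoldMax_cases (l := nums) (fun x => (x * x) ∈ s) (fun x => 1 + pvIter s (x * x) (F + 1)) (-1)
  by_cases hbig : b ≥ 2
  · rw [if_pos (by simpa using hbig)]
    have hwmem : (w * w) ∈ s := by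
      apply pvIter_mem_of_pos s (F + 1)
      omega
    have h1 : b ≤ nums.foldl (fun m x => if (x * x) ∈ s then max m (1 + pvIter s (x * x) (F + 1)) else m) (-1) := by
      rw [← hwb]
      exact hge w ((hmemn w).mp ((hmemv w).mp hw)) hwmem
    rcases hcases with hc | ⟨x, hx, hpx, hc⟩
    · omega
    · have hxV : (1 + pvIter s (x * x) (F + 1)) ∈ vals.map (fun v => 1 + pvIter s (v * v) (F + 1)) :=
        List.mem_map.mpr ⟨x, (hmemv x).mpr ((hmemn x).mpr hx), rfl⟩
      have := hbmax _ hxV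
      simp only [] at this
      omega
  · rw [if_neg (by simpa using hbig)]
    rcases hcases with hc | ⟨x, hx, hpx, hc⟩
    · exact hc
    · have hxge := pvIter_ge_one s F (x * x) hpx
      have hxV : (1 + pvIter s (x * x) (F + 1)) ∈ vals.map (fun v => 1 + pvIter s (v * v) (F + 1)) :=
        List.mem_map.mpr ⟨x, (hmemv x).mpr ((hmemn x).mpr hx), rfl⟩
      have := hbmax _ hxV
      simp only [] at this
      omega

theorem longestSquareStreak_main (nums : List Int) (h : Pre_longestSquareStreak nums) :
    longestSquareStreak nums = longestSquareStreak_alt nums := by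
  obtain ⟨h0, h1⟩ := h
  have hs : ∀ x ∈ PySem.Set.ofList nums, x ≠ 0 ∧ x ≠ 1 := by
    intro x hx
    rw [PySem.Set.mem_ofList] at hx
    constructor
    · rintro rfl; exact h0 hx
    · rintro rfl; exact h1 hx
  by_cases hnil : nums = []
  · subst hnil; decide
  -- abbreviations
  have hA : longestSquareStreak nums =
      nums.foldl (fun m x => if (x * x) ∈ PySem.Set.ofList nums
        then max m (1 + pvIter (PySem.Set.ofList nums) (x * x) (nums.length + 1)) else m) (-1) := by
    show nums.foldl (fun m x =>
        if pvALoop (PySem.Set.ofList nums) x (nums.length + 1) (x ^ 2) PySem.Set.empty = [] then m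
        else max m ((pvALoop (PySem.Set.ofList nums) x (nums.length + 1) (x ^ 2) PySem.Set.empty).length : Int)) (-1) = _
    apply List.foldl_ext
    intro m x _
    have hc := pvA_cand (PySem.Set.ofList nums) hs x nums.length
    by_cases hx : (x * x) ∈ PySem.Set.ofList nums
    · rw [if_pos hx] at hc
      rw [if_neg hc.2, hc.1, if_pos hx]
    · rw [if_neg hx] at hc
      rw [if_pos hc, if_neg hx]
  -- B characterisation
  have hnd : (PySem.List.sorted (PySem.Set.ofList nums) (fun x => x) true).Nodup :=
    (PySem.List.sorted_perm (PySem.Set.ofList nums) (fun x => x) true).nodup_iff.mpr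
      (PySem.Set.nodup_ofList nums)
  have hsorted : (PySem.List.sorted (PySem.Set.ofList nums) (fun x => x) true).Pairwise
      (fun a b => b < a) := by
    have hle := PySem.List.sorted_pairwise_rev (PySem.Set.ofList nums) (fun x => x)
    exact (hle.and hnd).imp (fun hab => lt_of_le_of_ne hab.1 (fun e => hab.2 e.symm))
  have hget := pvDpInv (PySem.Set.ofList nums) hs nums.length
    (PySem.Set.length_ofList_le nums)
    (PySem.List.sorted (PySem.Set.ofList nums) (fun x => x) true) PySem.Dict.empty
    (fun x hx => (PySem.List.mem_sorted _ _ _ x).mp hx)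
    hsorted
    (fun k hk => Or.inr ((PySem.List.mem_sorted _ _ _ k).mpr hk))
    (by
      intro k
      rw [PySem.Dict.get?_empty]
      by_cases hcond : k ∈ PySem.Set.ofList nums
        ∧ ∀ a ∈ PySem.List.sorted (PySem.Set.ofList nums) (fun x => x) true, a < k
      · exact absurd (hcond.2 k ((PySem.List.mem_sorted _ _ _ k).mpr hcond.1)) (lt_irrefl k)
      · rw [if_neg hcond])
  have hkeys : ((PySem.List.sorted (PySem.Set.ofList nums) (fun x => x) true).foldl
      (fun (dp : PySem.Dict Int Int) v =>
        dp.insert v (match dp.get? (v * v) with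
                     | some d => d + 1
                     | none => 1)) PySem.Dict.empty).keys
      = PySem.List.sorted (PySem.Set.ofList nums) (fun x => x) true := by
    rw [PySem.Dict.keys_foldl_insert, PySem.Dict.keys_empty, PySem.Set.update_nil_left,
      PySem.Set.ofList_eq_self_of_nodup _ hnd]
  have hvalues : ((PySem.List.sorted (PySem.Set.ofList nums) (fun x => x) true).foldl
      (fun (dp : PySem.Dict Int Int) v =>
        dp.insert v (match dp.get? (v * v) with
                     | some d => d + 1
                     | none => 1)) PySem.Dict.empty).values
      = (PySem.List.sorted (PySem.Set.ofList nums) (fun x => x) true).map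
          (fun v => 1 + pvIter (PySem.Set.ofList nums) (v * v) (nums.length + 1)) := by
    rw [PySem.Dict.values_eq_map_keys _ (by rw [hkeys]; exact hnd) 0, hkeys]
    apply List.map_congr_left
    intro a ha
    rw [PySem.Dict.getD_eq_get?_getD, hget a,
      if_pos ((PySem.List.mem_sorted _ _ _ a).mp ha)]
    rfl
  have hB : longestSquareStreak_alt nums =
      (if ((PySem.List.max? ((PySem.List.sorted (PySem.Set.ofList nums) (fun x => x) true).map
          (fun v => 1 + pvIter (PySem.Set.ofList nums) (v * v) (nums.length + 1))) (fun x => x)).getD 0) ≥ 2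
       then ((PySem.List.max? ((PySem.List.sorted (PySem.Set.ofList nums) (fun x => x) true).map
          (fun v => 1 + pvIter (PySem.Set.ofList nums) (v * v) (nums.length + 1))) (fun x => x)).getD 0)
       else -1) := by
    show (if ((PySem.List.max? ((PySem.List.sorted (PySem.Set.ofList nums) (fun x => x) true).foldl
        (fun (dp : PySem.Dict Int Int) v =>
          dp.insert v (match dp.get? (v * v) with
                       | some d => d + 1
                       | none => 1)) PySem.Dict.empty).values (fun x => x)).getD 0) ≥ 2
      then _ else -1) = _
    rw [hvalues]
  rw [hA, hB]
  apply pvFinal (PySem.Set.ofList nums) nums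
    (PySem.List.sorted (PySem.Set.ofList nums) (fun x => x) true)
    (by
      intro hcontra
      have hof : PySem.Set.ofList nums = [] := (PySem.List.sorted_eq_nil_iff _ _ _).mp hcontra
      obtain ⟨a, ha⟩ := List.exists_mem_of_ne_nil nums hnil
      have : a ∈ PySem.Set.ofList nums := (PySem.Set.mem_ofList nums a).mpr ha
      rw [hof] at this
      exact absurd this (List.not_mem_nil))
    (fun x => PySem.List.mem_sorted _ _ _ x)
    (fun x => PySem.Set.mem_ofList nums x)

-- ===== VERDICT (by name: the statement is the Claim_ definition above) =====
theorem longestSquareStreak_spec : Claim_equal_longestSquareStreak := by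
  intro nums _ hpre
  unfold Spec_longestSquareStreak
  exact longestSquareStreak_main nums hpre
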